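-- pv_equiv track=rewrite | github.com/rr637/QSP_Experiments | isa.py | template_to_pattern
-- ===== SOURCE A (Python) =====
-- def str_replace(string, char, index):
--     assert(index >= 0 and index < len(string))
--     output = string[0:index]
--     output += char
--     output += string[index + 1:]
--     return output
--
-- def template_to_pattern(template):
--     index = template.find("?")
--     if index == -1: return [template]
--     zero_branch = str_replace(template, "0", index)
--     one_branch = str_replace(template, "1", index)
--     output = template_to_pattern(zero_branch)
--     output.extend(template_to_pattern(one_branch))
--     return output
-- ===== SOURCE B (Python) =====
-- def template_to_pattern(template):
--     outs = [[]]
--     for ch in reversed(template):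
--         if ch == '?':
--             outs = [['0'] + p for p in outs] + [['1'] + p for p in outs]
--         else:
--             outs = [[ch] + p for p in outs]
--     return [''.join(p) for p in outs]
-- ===== Notes on version B (the rewrite author's own statement) =====
-- stated objective: simpler
-- what changed: A recursively locates the first wildcard character and rebuilds the whole string twice per branch via slicing; B makes a single right-to-left pass over the template, extending every partial pattern by one character (doubling the set at each wildcard), with no find, no slicing and no recursion.
import Mathlib
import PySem

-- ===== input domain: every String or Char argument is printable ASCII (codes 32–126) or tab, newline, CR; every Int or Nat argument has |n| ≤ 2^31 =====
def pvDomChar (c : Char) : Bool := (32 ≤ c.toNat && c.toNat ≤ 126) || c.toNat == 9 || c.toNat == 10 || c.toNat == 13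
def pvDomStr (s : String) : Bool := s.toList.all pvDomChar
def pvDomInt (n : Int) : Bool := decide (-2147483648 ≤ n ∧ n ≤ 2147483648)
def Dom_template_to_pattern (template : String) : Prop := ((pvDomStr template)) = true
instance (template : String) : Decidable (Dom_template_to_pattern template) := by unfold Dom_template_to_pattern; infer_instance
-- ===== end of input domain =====

-- B replaces A: instead of find-first-wildcard-and-recurse with slicing, a single right-to-left fold
-- extends all partial patterns one character at a time (objective: simpler; not faster).

-- ===== PORT A =====
-- Python strings are handled as their char lists (PySem.Chars is exact on them); String.ofList at the boundary.
-- str_replace(string, char, index): the assert always holds at A's call sites (index = a found '?'), so it is not a raise site here.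
def str_replace (s : List Char) (c : List Char) (i : Int) : List Char :=
  PySem.Chars.slice s (some 0) (some i) ++ c ++ PySem.Chars.slice s (some (i + 1)) none

-- facts about the first '?' found, needed by tpA's decreasing_by (hence above the port)
lemma find_q_decomp (s : List Char) (h : PySem.Chars.find s ['?'] ≠ -1) :
    ∃ n : Nat, PySem.Chars.find s ['?'] = (n : Int) ∧ '?' ∉ s.take n ∧
      s.drop n = '?' :: s.drop (n + 1) := by
  have h0 : 0 ≤ PySem.Chars.find s ['?'] := by
    have := PySem.Chars.neg_one_le_find s ['?']; omega
  obtain ⟨hpre, hmin⟩ := PySem.Chars.find_spec (s := s) (sub := ['?']) h0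
  refine ⟨(PySem.Chars.find s ['?']).toNat, (Int.toNat_of_nonneg h0).symm, ?_, ?_⟩
  · intro hmem
    obtain ⟨j, hj, hget⟩ := List.getElem_of_mem hmem
    have hjn : j < (PySem.Chars.find s ['?']).toNat := by
      have := hj; simp [List.length_take] at this; omega
    have hjl : j < s.length := by
      have := hj; simp [List.length_take] at this; omega
    refine hmin j hjn ?_
    have hsj : s[j] = '?' := by rw [List.getElem_take] at hget; exact hget
    have hdj : s.drop j = '?' :: s.drop (j + 1) := by
      rw [← List.getElem_cons_drop (as := s) hjl, hsj]
    rw [hdj]; exact ⟨s.drop (j + 1), rfl⟩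
  · obtain ⟨t, ht⟩ := hpre
    have hne : s.drop (PySem.Chars.find s ['?']).toNat ≠ [] := by
      rw [← ht]; simp
    have hlen : (PySem.Chars.find s ['?']).toNat < s.length := by
      by_contra hge
      exact hne (List.drop_eq_nil_of_le (by omega))
    have hcd := List.getElem_cons_drop (as := s) hlen
    rw [← hcd] at ht
    obtain ⟨h1, _⟩ := List.cons_eq_cons.mp ht
    rw [← hcd, ← h1]

lemma str_replace_natCast (s : List Char) (c : Char) (n : Nat) :
    str_replace s [c] (n : Int) = s.take n ++ c :: s.drop (n + 1) := by
  have h1 : (n : Int) + 1 = ((n + 1 : Nat) : Int) := by push_cast; ring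
  rw [str_replace, PySem.Chars.slice_eq_listSlice, PySem.Chars.slice_eq_listSlice,
    PySem.List.slice_zero_start, h1, PySem.List.slice_to_natCast,
    PySem.List.slice_from_natCast]
  simp

lemma count_str_replace_lt (s : List Char) (c : Char) (hc : c ≠ '?')
    (h : PySem.Chars.find s ['?'] ≠ -1) :
    (str_replace s [c] (PySem.Chars.find s ['?'])).count '?' < s.count '?' := by
  obtain ⟨n, hfn, _, hdrop⟩ := find_q_decomp s h
  rw [hfn, str_replace_natCast]
  conv_rhs => rw [← List.take_append_drop n s, hdrop]
  have hcc : (c == '?') = false := by simpa [beq_iff_eq] using hc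
  simp [List.count_append, List.count_cons, hcc]

def tpA (s : List Char) : List (List Char) :=
  let index := PySem.Chars.find s ['?']
  if h : index = -1 then [s]
  else
    let zero_branch := str_replace s ['0'] index
    let one_branch := str_replace s ['1'] index
    tpA zero_branch ++ tpA one_branch
termination_by s.count '?'
decreasing_by
  · exact count_str_replace_lt s '0' (by decide) h
  · exact count_str_replace_lt s '1' (by decide) h

def template_to_pattern (template : String) : List String :=
  (tpA template.toList).map String.ofList

-- ===== PORT B =====
-- one step of Source B's loop body
def stepB (outs : List (List Char)) (ch : Char) : List (List Char) :=
  if ch = '?' then outs.map (fun p => '0' :: p) ++ outs.map (fun p => '1' :: p)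
  else outs.map (fun p => ch :: p)

-- ''.join(p) on a list of single chars is String.ofList p (exact)
def template_to_pattern_alt (template : String) : List String :=
  (template.toList.reverse.foldl stepB [[]]).map String.ofList

-- ===== PRECONDITION & SPEC =====
def Spec_template_to_pattern (template : String) (out : List String) : Prop := out = template_to_pattern_alt template
instance (template : String) (out : List String) : Decidable (Spec_template_to_pattern template out) := by unfold Spec_template_to_pattern; infer_instance

-- ===== CLAIM (what is proved, stated in full; the proofs are below) =====
def Claim_equal_template_to_pattern : Prop := ∀ (template : String), Dom_template_to_pattern template → Spec_template_to_pattern template (template_to_pattern template)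

-- ===== LEMMAS AND PROOFS =====
-- the fold of B, read as a foldr (reversed-loop = foldr)
def gS (l : List Char) : List (List Char) := l.foldr (fun ch outs => stepB outs ch) [[]]

lemma alt_eq_gS (t : String) :
    template_to_pattern_alt t = (gS t.toList).map String.ofList := by
  rw [template_to_pattern_alt, gS, List.foldl_reverse]

lemma gS_cons (c : Char) (t : List Char) : gS (c :: t) = stepB (gS t) c := rfl

lemma gS_no_q (l : List Char) (h : '?' ∉ l) : gS l = [l] := by
  induction l with
  | nil => rfl
  | cons c t ih =>
    simp only [List.mem_cons, not_or] at h
    have hc : ¬ c = '?' := fun he => h.1 he.symm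
    rw [gS_cons, ih h.2]
    simp [stepB, hc]

lemma gS_append_no_q (pre l : List Char) (h : '?' ∉ pre) :
    gS (pre ++ l) = (gS l).map (pre ++ ·) := by
  induction pre with
  | nil => simp
  | cons c p ih =>
    simp only [List.mem_cons, not_or] at h
    have hc : ¬ c = '?' := fun he => h.1 he.symm
    rw [List.cons_append, gS_cons, ih h.2]
    simp [stepB, hc, List.map_map, Function.comp_def]

lemma find_eq_neg_one_of_no_q (s : List Char) (h : '?' ∉ s) :
    PySem.Chars.find s ['?'] = -1 := by
  rw [PySem.Chars.find_eq_neg_one_iff, List.singleton_infix_iff]; exact h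

lemma tpA_eq_gS_aux : ∀ (k : Nat) (s : List Char), s.count '?' ≤ k → tpA s = gS s := by
  intro k
  induction k with
  | zero =>
    intro s hs
    have h0 : '?' ∉ s := List.count_eq_zero.mp (Nat.le_antisymm hs (Nat.zero_le _))
    rw [tpA]; simp only [find_eq_neg_one_of_no_q s h0, dif_pos]
    exact (gS_no_q s h0).symm
  | succ k ih =>
    intro s hs
    by_cases hf : PySem.Chars.find s ['?'] = -1
    · have h0 : '?' ∉ s := by
        rw [← List.singleton_infix_iff, ← PySem.Chars.find_eq_neg_one_iff]; exact hf
      rw [tpA]; simp only [hf, dif_pos]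
      exact (gS_no_q s h0).symm
    · obtain ⟨n, hfn, hpre, hdrop⟩ := find_q_decomp s hf
      have hs' : s = s.take n ++ '?' :: s.drop (n + 1) := by
        conv_lhs => rw [← List.take_append_drop n s, hdrop]
      have hcount : ∀ c : Char, c ≠ '?' →
          (s.take n ++ c :: s.drop (n + 1)).count '?' ≤ k := by
        intro c hc
        have hsk := hs
        rw [hs'] at hsk
        have hcc : (c == '?') = false := by simpa [beq_iff_eq] using hc
        simp [List.count_append, List.count_cons, hcc] at hsk ⊢
        omega
      rw [tpA]
      simp only [hf, dif_neg, not_false_iff]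
      rw [hfn, str_replace_natCast, str_replace_natCast,
        ih _ (hcount '0' (by decide)), ih _ (hcount '1' (by decide)),
        gS_append_no_q _ _ hpre, gS_append_no_q _ _ hpre]
      conv_rhs => rw [hs']
      rw [gS_append_no_q _ _ hpre, gS_cons, gS_cons, gS_cons]
      simp [stepB, List.map_map, Function.comp_def]

lemma tpA_eq_gS (s : List Char) : tpA s = gS s := tpA_eq_gS_aux _ s le_rfl

-- ===== VERDICT (by name: the statement is the Claim_ definition above) =====
theorem template_to_pattern_spec : Claim_equal_template_to_pattern := by
  intro t _
  show template_to_pattern t = template_to_pattern_alt t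
  rw [template_to_pattern, alt_eq_gS, tpA_eq_gS]
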